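-- pv_equiv track=rewrite | github.com/nishadtardalkar/pokemondiffusion | build_multires_dataset.py | resolution_chain
-- ===== SOURCE A (Python) =====
-- def resolution_chain(base: int) -> list[int]:
--     """Return [base, base//2, base//4, ...] down to 1."""
--     if base < 1:
--         return []
--     out = [base]
--     while base > 1:
--         base = base // 2
--         out.append(base)
--     return out
-- ===== SOURCE B (Python) =====
-- def resolution_chain(base: int) -> list[int]:
--     """Return [base, base//2, base//4, ...] down to 1."""
--     if base < 1:
--         return []
--     out = []
--     acc = 0
--     for ch in bin(base)[2:]:          # binary digits of base, most significant first
--         acc = 2 * acc + (1 if ch == '1' else 0)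
--         out = [acc] + out             # build the chain back-to-front
--     return out
-- ===== Notes on version B (the rewrite author's own statement) =====
-- stated objective: alternative
-- what changed: B never divides: it scans the binary digits of base from most to least significant, reconstructs each successive prefix value by doubling the accumulator and adding the bit, and prepends it, building the halving chain back-to-front from the digit string instead of A's loop of repeated floor divisions.
import Mathlib
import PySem

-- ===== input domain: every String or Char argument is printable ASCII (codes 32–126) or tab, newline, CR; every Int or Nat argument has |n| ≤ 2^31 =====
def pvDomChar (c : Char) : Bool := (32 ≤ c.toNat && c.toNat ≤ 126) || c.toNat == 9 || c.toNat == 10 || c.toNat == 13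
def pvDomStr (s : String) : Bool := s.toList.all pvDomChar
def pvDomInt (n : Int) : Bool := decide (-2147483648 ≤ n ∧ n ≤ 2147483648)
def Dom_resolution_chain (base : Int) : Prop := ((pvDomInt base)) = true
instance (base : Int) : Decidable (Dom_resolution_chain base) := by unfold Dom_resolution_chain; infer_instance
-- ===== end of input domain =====

-- B builds the same halving chain back-to-front from base's binary digits (double the accumulator, add the bit), with no division in the loop.


-- ===== PORT A =====
-- the 'while base > 1' loop: emits each halved value in order
def resChainLoop (base : Int) : List Int :=
  if 1 < base then
    let b := PySem.Int.floordiv base 2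
    b :: resChainLoop b
  else []
termination_by base.toNat
decreasing_by
  simp only [PySem.Int.floordiv_eq_ediv_of_pos (by norm_num : (0:Int) < 2)]
  omega

def resolution_chain (base : Int) : List Int :=
  if base < 1 then []
  else base :: resChainLoop base

-- ===== PORT B =====
-- bin(base)[2:] for base ≥ 1: the binary digits of base, most significant first (true = '1')
def natBits (n : Nat) : List Bool :=
  if n = 0 then [] else natBits (n / 2) ++ [n % 2 == 1]

-- the for-loop: double acc, add the bit, prepend to out
def resolution_chain_alt (base : Int) : List Int :=
  if base < 1 then []
  else ((natBits base.toNat).foldl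
          (fun (st : Int × List Int) (b : Bool) =>
            let acc := 2 * st.1 + (if b then 1 else 0)
            (acc, acc :: st.2))
          (0, [])).2

-- ===== PRECONDITION & SPEC =====
def Spec_resolution_chain (base : Int) (out : List Int) : Prop := out = resolution_chain_alt base
instance (base : Int) (out : List Int) : Decidable (Spec_resolution_chain base out) := by unfold Spec_resolution_chain; infer_instance

-- ===== CLAIM =====
def Claim_equal_resolution_chain : Prop := ∀ (base : Int), Dom_resolution_chain base → Spec_resolution_chain base (resolution_chain base)

-- ===== LEMMAS AND PROOFS =====

-- A's full output (head plus loop) is the table of halvings, indexed by the digit count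
lemma resChain_key (m : Nat) (hm : 1 ≤ m) :
    ((m : Int) :: resChainLoop (m : Int)) =
      (List.range (natBits m).length).map (fun k => ((m / 2 ^ k : Nat) : Int)) := by
  revert hm
  induction m using Nat.strong_induction_on with
  | _ m ih =>
    intro hm
    rcases Nat.lt_or_ge m 2 with h2 | h2
    · interval_cases m
      rw [resChainLoop, show natBits 1 = [true] from by rw [natBits, natBits]; norm_num]
      norm_num [List.range_succ]
    · have hb : (natBits m).length = (natBits (m / 2)).length + 1 := by
        rw [natBits, if_neg (by omega : ¬ m = 0)]
        simp
      have hloop : resChainLoop (m : Int) =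
          ((m / 2 : Nat) : Int) :: resChainLoop ((m / 2 : Nat) : Int) := by
        rw [resChainLoop]
        rw [if_pos (show (1:Int) < (m:Int) by exact_mod_cast h2)]
        rw [show PySem.Int.floordiv (m : Int) 2 = ((m / 2 : Nat) : Int) by
          exact_mod_cast PySem.Int.floordiv_natCast m 2]
      have ihm := ih (m / 2) (by omega) (by omega)
      rw [hloop, ihm, hb, List.range_succ_eq_map, List.map_cons, List.map_map]
      simp only [pow_zero, Nat.div_one]
      congr 1
      apply List.map_congr_left
      intro k _
      simp only [Function.comp_apply]
      rw [Nat.pow_succ', Nat.div_div_eq_div_mul]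

-- B's fold over the digit list: the accumulator reconstructs a*2^L + n and the
-- output collects all prefix values, most recent first
lemma bfold_key (n : Nat) : ∀ (a : Int) (l : List Int),
    (natBits n).foldl
        (fun (st : Int × List Int) (b : Bool) =>
          let acc := 2 * st.1 + (if b then 1 else 0)
          (acc, acc :: st.2))
        (a, l) =
      (a * 2 ^ (natBits n).length + n,
       ((List.range (natBits n).length).map
          (fun k => a * 2 ^ ((natBits n).length - k) + ((n / 2 ^ k : Nat) : Int))) ++ l) := by
  induction n using Nat.strong_induction_on with
  | _ n ih =>
    intro a l
    by_cases h0 : n = 0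
    · subst h0
      rw [show natBits 0 = [] from by rw [natBits]; simp]
      simp
    · have hrw : natBits n = natBits (n / 2) ++ [n % 2 == 1] := by
        rw [natBits, if_neg h0]
      rw [hrw, List.foldl_append, ih (n / 2) (by omega) a l]
      simp only [List.foldl_cons, List.foldl_nil, List.length_append, List.length_singleton]
      set L := (natBits (n / 2)).length with hL
      have hacc : 2 * (a * 2 ^ L + ((n / 2 : Nat) : Int)) + (if n % 2 == 1 then (1:Int) else 0)
          = a * 2 ^ (L + 1) + (n : Int) := by
        have hsplit : (n : Int) = 2 * ((n / 2 : Nat) : Int) + ((n % 2 : Nat) : Int) := by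
          push_cast; omega
        have hb2 : (if n % 2 == 1 then (1:Int) else 0) = ((n % 2 : Nat) : Int) := by
          rcases Nat.mod_two_eq_zero_or_one n with he | he <;> simp [he]
        rw [hb2, hsplit]; ring
      refine Prod.ext ?_ ?_
      · simpa using hacc
      · simp only
        rw [List.range_succ_eq_map, List.map_cons, List.map_map, List.cons_append]
        refine congrArg₂ List.cons ?_ (congrArg (· ++ l) ?_)
        · simpa using hacc
        · apply List.map_congr_left
          intro k _
          simp only [Function.comp_apply]
          have h1 : L + 1 - (k + 1) = L - k := by omega
          have h2 : n / 2 ^ (k + 1) = (n / 2) / 2 ^ k := by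
            rw [Nat.pow_succ', Nat.div_div_eq_div_mul]
          rw [h1, h2]

theorem resolution_chain_spec : Claim_equal_resolution_chain := by
  intro base _
  unfold Spec_resolution_chain resolution_chain resolution_chain_alt
  by_cases hlt : base < 1
  · simp [hlt]
  · simp only [if_neg hlt]
    have hm : base = ((base.toNat : Nat) : Int) := by omega
    rw [hm]
    simp only [Int.toNat_natCast]
    rw [bfold_key base.toNat 0 []]
    simp only [zero_mul, zero_add, List.append_nil]
    rw [resChain_key base.toNat (by omega)]
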